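-- pv_equiv track=rewrite | github.com/nwyin/tau | benchmarks/subagent-decomposition/generate.py | _update_handler_imports
-- ===== SOURCE A (Python) =====
-- def _update_handler_imports(handler_code: str, extracted_functions: list[str]) -> str:
--     """Remove inlined utility functions and add import from utils."""
--     lines = handler_code.split("\n")
--     result_lines: list[str] = []
--     fn_names = [_extract_fn_name(fn) for fn in extracted_functions]
--
--     current_indent = 0
--
--     i = 0
--     added_import = False
--     while i < len(lines):
--         line = lines[i]
--         stripped = line.strip()
--
--         # Check if this line starts one of the functions to remove
--         is_target_def = False
--         for fn_name in fn_names: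
--             if stripped.startswith(f"def {fn_name}("):
--                 is_target_def = True
--                 break
--
--         if is_target_def:
--             # Skip the entire function (def line + body)
--             current_indent = len(line) - len(line.lstrip())
--             i += 1
--             # Skip docstring and body
--             while i < len(lines):
--                 next_line = lines[i]
--                 next_stripped = next_line.strip()
--                 if not next_stripped:
--                     i += 1
--                     continue
--                 next_indent = len(next_line) - len(next_line.lstrip())
--                 if (
--                     next_indent <= current_indent
--                     and next_stripped
--                     and not next_stripped.startswith('"""')
--                     and not next_stripped.startswith("'")
--                 ):
--                     # Check if it is another def at same level or content
--                     break
--                 i += 1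
--             # Remove trailing blank lines
--             while result_lines and not result_lines[-1].strip():
--                 result_lines.pop()
--             continue
--
--         # Add import after the module docstring and existing imports
--         if not added_import and stripped.startswith(
--             ("def ", "class ", "AUTH_", "API_", "ADMIN_", "WEBHOOK_", "BILLING_", "NOTIFY_", "SEARCH_", "_resources", "_event_log")
--         ):
--             import_line = f"from utils import {', '.join(fn_names)}"
--             result_lines.append(import_line)
--             result_lines.append("")
--             result_lines.append("")
--             added_import = True
--
--         result_lines.append(line)
--         i += 1
--
--     return "\n".join(result_lines)
--
-- def _extract_fn_name(fn_code: str) -> str: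
--     """Extract function name from a function definition string."""
--     for line in fn_code.strip().split("\n"):
--         stripped = line.strip()
--         if stripped.startswith("def "):
--             name = stripped[4:].split("(")[0].strip()
--             return name
--     return "unknown"
-- ===== SOURCE B (Python) =====
-- _TRIGGERS = ("def ", "class ", "AUTH_", "API_", "ADMIN_", "WEBHOOK_", "BILLING_", "NOTIFY_", "SEARCH_", "_resources", "_event_log")
--
--
-- def _fn_name(fn_code: str) -> str:
--     """Name of the first 'def' line of fn_code, or 'unknown'."""
--     return next((l.strip()[4:].split("(")[0].strip()
--                  for l in fn_code.strip().split("\n")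
--                  if l.strip().startswith("def ")), "unknown")
--
--
-- def _skip_body(lines: list[str], i: int, indent: int) -> int:
--     """Index of the first line at or after i that ends a body opened at `indent`."""
--     while i < len(lines):
--         s = lines[i].strip()
--         if s and (len(lines[i]) - len(lines[i].lstrip()) <= indent
--                   and not s.startswith('"""') and not s.startswith("'")):
--             return i
--         i += 1
--     return i
--
--
-- def _remove_functions(lines: list[str], fn_names: list[str]) -> list[str]:
--     """Drop every targeted def (with body) and the blank lines just before it."""
--     kept: list[str] = []
--     pending: list[str] = []  # whitespace-only lines not yet committed
--     i = 0
--     while i < len(lines):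
--         line = lines[i]
--         s = line.strip()
--         if any(s.startswith(f"def {n}(") for n in fn_names):
--             pending = []  # blanks right before a removed def vanish with it
--             i = _skip_body(lines, i + 1, len(line) - len(line.lstrip()))
--         elif not s:
--             pending.append(line)
--             i += 1
--         else:
--             kept.extend(pending)
--             pending = []
--             kept.append(line)
--             i += 1
--     kept.extend(pending)
--     return kept
--
--
-- def _insert_import(kept: list[str], fn_names: list[str]) -> list[str]:
--     for j, line in enumerate(kept):
--         if line.strip().startswith(_TRIGGERS):
--             return kept[:j] + [f"from utils import {', '.join(fn_names)}", "", ""] + kept[j:]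
--     return kept
--
--
-- def _update_handler_imports(handler_code: str, extracted_functions: list[str]) -> str:
--     fn_names = [_fn_name(fn) for fn in extracted_functions]
--     lines = handler_code.split("\n")
--     return "\n".join(_insert_import(_remove_functions(lines, fn_names), fn_names))
-- ===== Notes on version B (the rewrite author's own statement) =====
-- stated objective: alternative
-- what changed: A's single pass with backward pops of trailing blank result lines and an in-loop import flag is re-decomposed into two passes: a removal pass that buffers pending whitespace-only lines (committed only when a kept line follows, discarded when a removed def follows) and a separate pass that splices the import block before the first trigger line.
import Mathlib
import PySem

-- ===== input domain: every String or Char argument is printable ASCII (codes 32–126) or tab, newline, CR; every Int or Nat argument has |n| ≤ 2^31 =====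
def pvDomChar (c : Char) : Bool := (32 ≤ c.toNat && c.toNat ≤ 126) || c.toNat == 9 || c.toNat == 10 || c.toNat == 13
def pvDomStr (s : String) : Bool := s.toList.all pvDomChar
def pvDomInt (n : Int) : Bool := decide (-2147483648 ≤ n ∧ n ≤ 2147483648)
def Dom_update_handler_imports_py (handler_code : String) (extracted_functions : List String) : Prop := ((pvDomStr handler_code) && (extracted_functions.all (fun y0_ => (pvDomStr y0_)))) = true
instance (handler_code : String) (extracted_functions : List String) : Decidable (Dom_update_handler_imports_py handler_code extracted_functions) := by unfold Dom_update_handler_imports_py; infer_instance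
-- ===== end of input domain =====

-- B re-decomposes A's single pass into two passes: a removal pass that buffers pending blank
-- lines instead of popping them back off the result, then a separate import-insertion pass
-- before the first trigger line; objective: alternative decomposition, same cost.

-- ===== shared small helpers (identical expressions in both Python versions) =====

def pvIndent (l : String) : Int := PySem.Str.len l - PySem.Str.len (PySem.Str.lstrip l)

def pvTriggers : List String := ["def ", "class ", "AUTH_", "API_", "ADMIN_", "WEBHOOK_", "BILLING_", "NOTIFY_", "SEARCH_", "_resources", "_event_log"]

def pvTrigger (stripped : String) : Bool := pvTriggers.any (fun p => PySem.Str.startswith stripped p)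

def pvIsTarget (names : List String) (stripped : String) : Bool :=
  names.any (fun n => PySem.Str.startswith stripped ("def " ++ n ++ "("))

-- handler_code.split("\n"); the separator is non-empty so split? is never none
def pvSplitLines (s : String) : List String := (PySem.Str.split? s "\n").getD []

def pvImportLine (names : List String) : String := "from utils import " ++ PySem.Str.join ", " names

-- the inner body-skipping loop of A (B's _skip_body has the same line-by-line rule)
def pvSkipBody (ind : Int) : List String → List String
  | [] => []
  | l :: rest =>
    if PySem.Str.strip l == "" then pvSkipBody ind rest
    else if pvIndent l ≤ ind && !(PySem.Str.strip l == "") &&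
            !(PySem.Str.startswith (PySem.Str.strip l) "\"\"\"") &&
            !(PySem.Str.startswith (PySem.Str.strip l) "'") then l :: rest
    else pvSkipBody ind rest

-- needed for termination of both main loops
theorem pvSkipBody_length_le (ind : Int) (xs : List String) : (pvSkipBody ind xs).length ≤ xs.length := by
  induction xs with
  | nil => simp [pvSkipBody]
  | cons l rest ih => simp only [pvSkipBody]; split_ifs <;> simp <;> omega

-- ===== PORT A =====

-- "while result_lines and not result_lines[-1].strip(): result_lines.pop()"
def pvPopBlanks (res : List String) : List String :=
  (res.reverse.dropWhile (fun l => PySem.Str.strip l == "")).reverse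

-- _extract_fn_name: the for-loop over the lines (first 'def ' line wins)
def pvExtractALoop : List String → String
  | [] => "unknown"
  | l :: rest =>
    if PySem.Str.startswith (PySem.Str.strip l) "def " then
      -- stripped[4:].split("(")[0].strip(); split("(") is never empty, [0] is its head
      PySem.Str.strip (((PySem.Str.split? (PySem.Str.slice (PySem.Str.strip l) (some 4) none) "(").getD []).headI)
    else pvExtractALoop rest

def pvExtractA (fn : String) : String := pvExtractALoop (pvSplitLines (PySem.Str.strip fn))

-- the main while-loop of A: state = (remaining lines, result_lines, added_import)
def pvAGo (names : List String) : List String → List String → Bool → List String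
  | [], res, _ => res
  | l :: rest, res, added =>
    if pvIsTarget names (PySem.Str.strip l) then
      pvAGo names (pvSkipBody (pvIndent l) rest) (pvPopBlanks res) added
    else if !added && pvTrigger (PySem.Str.strip l) then
      pvAGo names rest (res ++ [pvImportLine names, "", "", l]) true
    else
      pvAGo names rest (res ++ [l]) added
  termination_by lines _ _ => lines.length
  decreasing_by
  · have := pvSkipBody_length_le (pvIndent l) rest; simp; omega
  · simp
  · simp

def update_handler_imports_py (handler_code : String) (extracted_functions : List String) : String :=
  PySem.Str.join "\n" (pvAGo (extracted_functions.map pvExtractA) (pvSplitLines handler_code) [] false)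

-- ===== PORT B =====

-- _fn_name: first 'def ' line found, its name extracted
def pvNameOf (l : String) : String :=
  PySem.Str.strip (((PySem.Str.split? (PySem.Str.slice (PySem.Str.strip l) (some 4) none) "(").getD []).headI)

def pvExtractB (fn : String) : String :=
  ((pvSplitLines (PySem.Str.strip fn)).find?
      (fun l => PySem.Str.startswith (PySem.Str.strip l) "def ")).elim "unknown" pvNameOf

-- _remove_functions: kept lines + pending whitespace-only buffer
def pvBGo (names : List String) : List String → List String → List String → List String
  | [], kept, pending => kept ++ pending
  | l :: rest, kept, pending =>
    if pvIsTarget names (PySem.Str.strip l) then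
      pvBGo names (pvSkipBody (pvIndent l) rest) kept []
    else if PySem.Str.strip l == "" then
      pvBGo names rest kept (pending ++ [l])
    else
      pvBGo names rest (kept ++ pending ++ [l]) []
  termination_by lines _ _ => lines.length
  decreasing_by
  · have := pvSkipBody_length_le (pvIndent l) rest; simp; omega
  · simp
  · simp

-- _insert_import: splice the import block in front of the first trigger line
def pvInsertImport (names : List String) (kept : List String) : List String :=
  match kept.findIdx? (fun l => pvTrigger (PySem.Str.strip l)) with
  | some j => kept.take j ++ [pvImportLine names, "", ""] ++ kept.drop j
  | none => kept

def update_handler_imports_py_alt (handler_code : String) (extracted_functions : List String) : String :=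
  let fn_names := extracted_functions.map pvExtractB
  PySem.Str.join "\n" (pvInsertImport fn_names (pvBGo fn_names (pvSplitLines handler_code) [] []))

-- ===== PRECONDITION & SPEC =====
def Spec_update_handler_imports_py (handler_code : String) (extracted_functions : List String) (out : String) : Prop := out = update_handler_imports_py_alt handler_code extracted_functions
instance (handler_code : String) (extracted_functions : List String) (out : String) : Decidable (Spec_update_handler_imports_py handler_code extracted_functions out) := by unfold Spec_update_handler_imports_py; infer_instance

-- ===== CLAIM (what is proved, stated in full; the proofs are below) =====
def Claim_equal_update_handler_imports_py : Prop := ∀ (handler_code : String) (extracted_functions : List String), Dom_update_handler_imports_py handler_code extracted_functions → Spec_update_handler_imports_py handler_code extracted_functions (update_handler_imports_py handler_code extracted_functions)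

-- ===== LEMMAS AND PROOFS =====

-- the two name extractors agree
theorem pvExtract_loop_eq (xs : List String) :
    pvExtractALoop xs =
      (xs.find? (fun l => PySem.Str.startswith (PySem.Str.strip l) "def ")).elim "unknown" pvNameOf := by
  induction xs with
  | nil => simp [pvExtractALoop]
  | cons l t ih =>
    cases h : PySem.Str.startswith (PySem.Str.strip l) "def " with
    | true =>
      simp only [pvExtractALoop, List.find?_cons, h, if_true, Option.elim_some]
      rfl
    | false =>
      simp only [pvExtractALoop, List.find?_cons, h, Bool.false_eq_true, if_false]
      exact ih

theorem pvExtract_eq (fn : String) : pvExtractA fn = pvExtractB fn := by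
  simp [pvExtractA, pvExtractB, pvExtract_loop_eq]

-- a string with empty strip is never a trigger / target-def line
theorem pvTrigger_empty : pvTrigger "" = false := by decide

-- popping the blank suffix removes exactly the pending buffer
theorem pvPopBlanks_spec (kept pending : List String)
    (hp : ∀ x ∈ pending, (PySem.Str.strip x == "") = true)
    (hk : ∀ x ∈ kept.getLast?, (PySem.Str.strip x == "") = false) :
    pvPopBlanks (kept ++ pending) = kept := by
  unfold pvPopBlanks
  rw [List.reverse_append]
  have h1 : pending.reverse.dropWhile (fun l => PySem.Str.strip l == "") = [] := by
    rw [List.dropWhile_eq_nil_iff]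
    intro x hx; exact hp x (List.mem_reverse.mp hx)
  rw [List.dropWhile_append, h1]
  simp only [List.isEmpty_nil, if_true]
  have h2 : kept.reverse.dropWhile (fun l => PySem.Str.strip l == "") = kept.reverse := by
    cases hrev : kept.reverse with
    | nil => simp
    | cons a t =>
      have ha : kept.getLast? = some a := by
        rw [← List.head?_reverse, hrev]; rfl
      rw [List.dropWhile_cons, hk a (by simp [ha])]
      simp
  rw [h2, List.reverse_reverse]

-- pulling an already-committed prefix out of the removal loop
theorem pvBGo_append (names : List String) :
    ∀ (n : Nat) (rest : List String), rest.length ≤ n →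
      ∀ kept pending, pvBGo names rest kept pending = kept ++ pvBGo names rest [] pending := by
  intro n
  induction n with
  | zero =>
    intro rest h kept pending
    have : rest = [] := by cases rest <;> simp_all
    subst this; simp [pvBGo]
  | succ n ih =>
    intro rest h kept pending
    match rest with
    | [] => simp [pvBGo]
    | l :: rest' =>
      simp only [pvBGo]
      split_ifs with h1 h2
      · have hle : (pvSkipBody (pvIndent l) rest').length ≤ n := by
          have := pvSkipBody_length_le (pvIndent l) rest'; simp at h; omega
        rw [ih _ hle kept [], ih _ hle [] []]
      · have hle : rest'.length ≤ n := by simp at h; omega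
        rw [ih _ hle kept (pending ++ [l]), ih _ hle [] (pending ++ [l])]
      · have hle : rest'.length ≤ n := by simp at h; omega
        rw [ih _ hle (kept ++ pending ++ [l]) [], ih _ hle ([] ++ pending ++ [l]) []]
        simp

theorem pvFindIdx_append {α : Type} (p : α → Bool) (xs : List α) (l : α) (ys : List α)
    (hxs : ∀ x ∈ xs, p x = false) (hl : p l = true) :
    (xs ++ l :: ys).findIdx? p = some xs.length := by
  induction xs with
  | nil => simp [List.findIdx?_cons, hl]
  | cons x t ih =>
    have hx : p x = false := hxs x (by simp)
    simp only [List.cons_append, List.findIdx?_cons, hx]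
    rw [ih (fun y hy => hxs y (by simp [hy]))]
    simp

theorem pvInsertImport_at (names : List String) (xs : List String) (l : String) (ys : List String)
    (hxs : ∀ x ∈ xs, pvTrigger (PySem.Str.strip x) = false)
    (hl : pvTrigger (PySem.Str.strip l) = true) :
    pvInsertImport names (xs ++ l :: ys) = xs ++ pvImportLine names :: "" :: "" :: l :: ys := by
  unfold pvInsertImport
  rw [pvFindIdx_append _ xs l ys hxs hl]
  simp

theorem pvInsertImport_none (names : List String) (xs : List String)
    (hxs : ∀ x ∈ xs, pvTrigger (PySem.Str.strip x) = false) :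
    pvInsertImport names xs = xs := by
  unfold pvInsertImport
  rw [List.findIdx?_eq_none_iff.mpr hxs]

-- after the import is added, A's loop with result = kept ++ pending equals B's removal loop
theorem pvT (names : List String) :
    ∀ (n : Nat) (rest : List String), rest.length ≤ n →
      ∀ kept pending,
        (∀ x ∈ pending, (PySem.Str.strip x == "") = true) →
        (∀ x ∈ kept.getLast?, (PySem.Str.strip x == "") = false) →
        pvAGo names rest (kept ++ pending) true = pvBGo names rest kept pending := by
  intro n
  induction n with
  | zero =>
    intro rest h kept pending hp hk
    have : rest = [] := by cases rest <;> simp_all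
    subst this; simp [pvAGo, pvBGo]
  | succ n ih =>
    intro rest h kept pending hp hk
    match rest with
    | [] => simp [pvAGo, pvBGo]
    | l :: rest' =>
      have hlen : rest'.length ≤ n := by simp at h; omega
      simp only [pvAGo, pvBGo, Bool.not_true, Bool.false_and, Bool.false_eq_true, if_false]
      split_ifs with h1 h2
      · -- target def: pending discarded on both sides
        rw [pvPopBlanks_spec kept pending hp hk]
        have hle : (pvSkipBody (pvIndent l) rest').length ≤ n := by
          have := pvSkipBody_length_le (pvIndent l) rest'; omega
        have := ih _ hle kept [] (by simp) hk
        simpa using this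
      · -- whitespace-only line: goes to the pending buffer
        have := ih _ hlen kept (pending ++ [l])
          (by intro x hx; rcases List.mem_append.mp hx with h' | h'
              · exact hp x h'
              · simp at h'; subst h'; simpa using h2) hk
        simpa [List.append_assoc] using this
      · -- ordinary kept line: flushes the buffer
        have hgl : ∀ x ∈ (kept ++ pending ++ [l]).getLast?, (PySem.Str.strip x == "") = false := by
          intro x hx
          simp at hx
          subst hx; simpa using h2
        have := ih _ hlen (kept ++ pending ++ [l]) [] (by simp) hgl
        simpa [List.append_assoc] using this

-- before the import is added: A's loop equals insert-import applied to B's removal loop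
theorem pvF (names : List String) :
    ∀ (n : Nat) (rest : List String), rest.length ≤ n →
      ∀ kept pending,
        (∀ x ∈ pending, (PySem.Str.strip x == "") = true) →
        (∀ x ∈ kept.getLast?, (PySem.Str.strip x == "") = false) →
        (∀ x ∈ kept, pvTrigger (PySem.Str.strip x) = false) →
        pvAGo names rest (kept ++ pending) false = pvInsertImport names (pvBGo names rest kept pending) := by
  intro n
  induction n with
  | zero =>
    intro rest h kept pending hp hk ht
    have : rest = [] := by cases rest <;> simp_all
    subst this
    simp only [pvAGo, pvBGo]
    rw [pvInsertImport_none]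
    intro x hx
    rcases List.mem_append.mp hx with h' | h'
    · exact ht x h'
    · have : PySem.Str.strip x = "" := by have := hp x h'; simpa using this
      rw [this, pvTrigger_empty]
  | succ n ih =>
    intro rest h kept pending hp hk ht
    have htp : ∀ x ∈ kept ++ pending, pvTrigger (PySem.Str.strip x) = false := by
      intro x hx
      rcases List.mem_append.mp hx with h' | h'
      · exact ht x h'
      · have : PySem.Str.strip x = "" := by have := hp x h'; simpa using this
        rw [this, pvTrigger_empty]
    match rest with
    | [] =>
      simp only [pvAGo, pvBGo]
      rw [pvInsertImport_none _ _ htp]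
    | l :: rest' =>
      have hlen : rest'.length ≤ n := by simp at h; omega
      simp only [pvAGo, pvBGo, Bool.not_false, Bool.true_and]
      split_ifs with h1 h2 h3 h3
      · -- target def
        rw [pvPopBlanks_spec kept pending hp hk]
        have hle : (pvSkipBody (pvIndent l) rest').length ≤ n := by
          have := pvSkipBody_length_le (pvIndent l) rest'; omega
        have := ih _ hle kept [] (by simp) hk ht
        simpa using this
      · -- trigger and whitespace-only at once: impossible
        exfalso
        have : PySem.Str.strip l = "" := by simpa using h3
        rw [this, pvTrigger_empty] at h2
        exact Bool.false_ne_true h2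
      · -- the import is inserted here
        have hgl : ∀ x ∈ (kept ++ pending ++ [pvImportLine names, "", "", l]).getLast?,
            (PySem.Str.strip x == "") = false := by
          intro x hx
          have hsome : (kept ++ pending ++ [pvImportLine names, "", "", l]).getLast? = some l := by
            simp [List.getLast?_append]
          rw [hsome] at hx
          simp at hx; subst hx; simpa using h3
        have hT := pvT names n rest' hlen (kept ++ pending ++ [pvImportLine names, "", "", l]) []
          (by simp) hgl
        rw [List.append_nil] at hT
        have hB1 := pvBGo_append names n rest' hlen (kept ++ pending ++ [pvImportLine names, "", "", l]) []
        have hB2 := pvBGo_append names n rest' hlen (kept ++ pending ++ [l]) []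
        rw [hT, hB1, hB2]
        rw [show kept ++ pending ++ [l] ++ pvBGo names rest' [] [] =
              (kept ++ pending) ++ l :: pvBGo names rest' [] [] from by simp]
        rw [pvInsertImport_at names (kept ++ pending) l _ htp h2]
        simp
      · -- whitespace-only line: goes to the pending buffer
        have := ih _ hlen kept (pending ++ [l])
          (by intro x hx; rcases List.mem_append.mp hx with h' | h'
              · exact hp x h'
              · simp at h'; subst h'; simpa using h3) hk ht
        simpa [List.append_assoc] using this
      · -- ordinary non-trigger line
        have hgl : ∀ x ∈ (kept ++ pending ++ [l]).getLast?, (PySem.Str.strip x == "") = false := by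
          intro x hx
          simp at hx
          subst hx; simpa using h3
        have htk : ∀ x ∈ kept ++ pending ++ [l], pvTrigger (PySem.Str.strip x) = false := by
          intro x hx
          rcases List.mem_append.mp hx with h' | h'
          · exact htp x h'
          · simp at h'; subst h'; simpa using h2
        have := ih _ hlen (kept ++ pending ++ [l]) [] (by simp) hgl htk
        simpa [List.append_assoc] using this

-- ===== VERDICT (by name: the statement is the Claim_ definition above) =====
theorem update_handler_imports_py_spec : Claim_equal_update_handler_imports_py := by
  intro handler_code extracted_functions _
  unfold Spec_update_handler_imports_py update_handler_imports_py update_handler_imports_py_alt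
  rw [show extracted_functions.map pvExtractA = extracted_functions.map pvExtractB from
        List.map_congr_left (fun fn _ => pvExtract_eq fn)]
  have h := pvF (extracted_functions.map pvExtractB) (pvSplitLines handler_code).length
    (pvSplitLines handler_code) le_rfl [] [] (by simp) (by simp) (by simp)
  simp only [List.nil_append] at h
  rw [h]
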